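-- pv_equiv track=rewrite | github.com/libing28390-sketch/netsops | backend/services/topology_service.py | normalize_interface_name
-- ===== SOURCE A (Python) =====
-- INTERFACE_ALIASES = [
--     ('tengigabitethernet', 'te'),
--     ('twentyfivegige', 'tw'),
--     ('twentyfivegigabitethernet', 'tw'),
--     ('fortygigabitethernet', 'fo'),
--     ('hundredgigabitethernet', 'hu'),
--     ('gigabitethernet', 'gi'),
--     ('fastethernet', 'fa'),
--     ('ethernet', 'eth'),
--     ('port-channel', 'po'),
--     ('portchannel', 'po'),
--     ('bundle-ether', 'be'),
--     ('loopback', 'lo'),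
--     ('management', 'mgmt'),
--     ('mgmteth', 'mgmt'),
--     ('vlan', 'vl'),
-- ]
--
-- def normalize_interface_name(value: str | None) -> str:
--     if not value:
--         return ''
--     raw = str(value).strip().lower().replace(' ', '')
--     raw = raw.replace('\u200b', '')
--     for source, target in INTERFACE_ALIASES:
--         if raw.startswith(source):
--             raw = raw.replace(source, target, 1)
--             break
--     raw = raw.replace('ethernet', 'eth') if raw.startswith('ethernet') else raw
--     return raw
-- ===== SOURCE B (Python) =====
-- INTERFACE_ALIASES = [
--     ('tengigabitethernet', 'te'),
--     ('twentyfivegige', 'tw'),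
--     ('twentyfivegigabitethernet', 'tw'),
--     ('fortygigabitethernet', 'fo'),
--     ('hundredgigabitethernet', 'hu'),
--     ('gigabitethernet', 'gi'),
--     ('fastethernet', 'fa'),
--     ('ethernet', 'eth'),
--     ('port-channel', 'po'),
--     ('portchannel', 'po'),
--     ('bundle-ether', 'be'),
--     ('loopback', 'lo'),
--     ('management', 'mgmt'),
--     ('mgmteth', 'mgmt'),
--     ('vlan', 'vl'),
-- ]
--
-- # No alias source is a prefix of another, so at most one alias can match a
-- # given name; we may therefore look the prefix up by length in a hash map
-- # instead of scanning the alias list.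
-- _ALIAS_MAP = dict(INTERFACE_ALIASES)
-- _ALIAS_LENGTHS = sorted({len(src) for src in _ALIAS_MAP}, reverse=True)
--
-- def normalize_interface_name(value):
--     if not value:
--         return ''
--     raw = str(value).strip().lower().replace(' ', '').replace('\u200b', '')
--     for n in _ALIAS_LENGTHS:
--         target = _ALIAS_MAP.get(raw[:n])
--         if target is not None:
--             raw = target + raw[n:]
--             break
--     if raw.startswith('ethernet'):
--         raw = raw.replace('ethernet', 'eth')
--     return raw
-- ===== Notes on version B (the rewrite author's own statement) =====
-- stated objective: alternative
-- what changed: A scans the alias list in order testing startswith per alias; B instead builds a dict of the aliases once and, for each distinct source length (longest first), looks the name's prefix of that length up in the dict — correct because no alias source is a prefix of another, so at most one alias can match.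
import Mathlib
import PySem

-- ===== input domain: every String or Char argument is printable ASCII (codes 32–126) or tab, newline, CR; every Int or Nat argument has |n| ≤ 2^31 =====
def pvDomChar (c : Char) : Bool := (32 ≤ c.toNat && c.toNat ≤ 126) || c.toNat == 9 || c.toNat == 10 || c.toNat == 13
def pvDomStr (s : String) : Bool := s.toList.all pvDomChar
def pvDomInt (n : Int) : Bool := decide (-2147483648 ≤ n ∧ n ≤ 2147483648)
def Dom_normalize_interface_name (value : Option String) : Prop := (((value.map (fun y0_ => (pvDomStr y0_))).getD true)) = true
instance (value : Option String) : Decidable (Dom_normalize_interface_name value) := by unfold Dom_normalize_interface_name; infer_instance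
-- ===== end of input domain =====

-- B replaces A's ordered scan of the alias list (startswith per alias) by a hash-map lookup of
-- the name's prefix for each distinct alias length; valid because no alias source is a prefix of
-- another, so at most one alias can match.  Objective: alternative (same cost at this list size).

-- ===== PORT A =====

-- shared data of both Pythons: the module constant INTERFACE_ALIASES, as char lists
def INTERFACE_ALIASES : List (List Char × List Char) :=
  [("tengigabitethernet".toList, "te".toList),
   ("twentyfivegige".toList, "tw".toList),
   ("twentyfivegigabitethernet".toList, "tw".toList),
   ("fortygigabitethernet".toList, "fo".toList),
   ("hundredgigabitethernet".toList, "hu".toList),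
   ("gigabitethernet".toList, "gi".toList),
   ("fastethernet".toList, "fa".toList),
   ("ethernet".toList, "eth".toList),
   ("port-channel".toList, "po".toList),
   ("portchannel".toList, "po".toList),
   ("bundle-ether".toList, "be".toList),
   ("loopback".toList, "lo".toList),
   ("management".toList, "mgmt".toList),
   ("mgmteth".toList, "mgmt".toList),
   ("vlan".toList, "vl".toList)]

-- hand port of Python's s.replace(old, new, 1) (count-limited replace; PySem.Chars.replace has
-- no count): replace the FIRST occurrence of old, exact also for old = '' (insert at front)
def pyReplace1 (old new : List Char) (s : List Char) : List Char :=
  if old.isPrefixOf s then new ++ s.drop old.length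
  else match s with
    | [] => []
    | c :: cs => c :: pyReplace1 old new cs

-- A's for-loop with break: first alias whose source is a prefix is substituted once
def aliasLoopA : List (List Char × List Char) → List Char → List Char
  | [], raw => raw
  | (src, tgt) :: rest, raw =>
    if PySem.Chars.startswith raw src then pyReplace1 src tgt raw else aliasLoopA rest raw

def normalize_interface_name (value : Option String) : String :=
  match value with
  | none => ""                                   -- `if not value` (None is falsy)
  | some s =>
    if s.toList = [] then ""                     -- `if not value` (empty string is falsy)
    else
      let raw := PySem.Chars.replace (PySem.Chars.lower (PySem.Chars.strip s.toList)) [' '] []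
      let raw := PySem.Chars.replace raw ['\u200b'] []
      let raw := aliasLoopA INTERFACE_ALIASES raw
      let raw := if PySem.Chars.startswith raw "ethernet".toList then
                   PySem.Chars.replace raw "ethernet".toList "eth".toList
                 else raw
      String.ofList raw

-- ===== PORT B =====

-- _ALIAS_MAP = dict(INTERFACE_ALIASES)
def ALIAS_MAP : PySem.Dict (List Char) (List Char) := PySem.Dict.ofList INTERFACE_ALIASES

-- _ALIAS_LENGTHS = sorted({len(src) for src in _ALIAS_MAP}, reverse=True)
def ALIAS_LENGTHS : List Int :=
  PySem.List.sorted (PySem.Set.ofList (INTERFACE_ALIASES.map (fun p => PySem.List.len p.1)))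
    (fun n => n) true

-- B's for-loop over the distinct alias lengths, hash lookup of the prefix, break on a hit
def aliasLoopB : List Int → List Char → List Char
  | [], raw => raw
  | n :: ns, raw =>
    match ALIAS_MAP.get? (PySem.List.slice raw none (some n)) with
    | some tgt => tgt ++ PySem.List.slice raw (some n) none
    | none => aliasLoopB ns raw

def normalize_interface_name_alt (value : Option String) : String :=
  match value with
  | none => ""
  | some s =>
    if s.toList = [] then ""
    else
      let raw := PySem.Chars.replace
        (PySem.Chars.replace (PySem.Chars.lower (PySem.Chars.strip s.toList)) [' '] [])
        ['\u200b'] []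
      let raw := aliasLoopB ALIAS_LENGTHS raw
      let raw := if PySem.Chars.startswith raw "ethernet".toList then
                   PySem.Chars.replace raw "ethernet".toList "eth".toList
                 else raw
      String.ofList raw

-- ===== PRECONDITION & SPEC =====
def Spec_normalize_interface_name (value : Option String) (out : String) : Prop := out = normalize_interface_name_alt value
instance (value : Option String) (out : String) : Decidable (Spec_normalize_interface_name value out) := by unfold Spec_normalize_interface_name; infer_instance

-- ===== CLAIM (what is proved, stated in full; the proofs are below) =====
def Claim_equal_normalize_interface_name : Prop := ∀ (value : Option String), Dom_normalize_interface_name value → Spec_normalize_interface_name value (normalize_interface_name value)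

-- ===== LEMMAS AND PROOFS =====

-- no alias source is a prefix of another (and sources are distinct): the matching alias is unique
theorem aliases_no_prefix : ∀ p ∈ INTERFACE_ALIASES, ∀ q ∈ INTERFACE_ALIASES, p.1 <+: q.1 → p = q := by
  decide

theorem alias_keys_nodup : ALIAS_MAP.keys.Nodup := by decide

theorem alias_items : ALIAS_MAP.items = INTERFACE_ALIASES := by decide

theorem alias_lengths_mem : ∀ p ∈ INTERFACE_ALIASES, ((p.1.length : Int)) ∈ ALIAS_LENGTHS := by decide

theorem alias_lengths_nonneg : ∀ n ∈ ALIAS_LENGTHS, 0 ≤ n := by decide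

theorem alias_uniq (raw : List Char) :
    ∀ p ∈ INTERFACE_ALIASES, ∀ q ∈ INTERFACE_ALIASES, p.1 <+: raw → q.1 <+: raw → p = q :=
  fun p hp q hq h1 h2 =>
    (List.prefix_or_prefix_of_prefix h1 h2).elim
      (aliases_no_prefix p hp q hq)
      (fun h => (aliases_no_prefix q hq p hp h).symm)

theorem alias_get?_some {key t : List Char} (h : ALIAS_MAP.get? key = some t) :
    (key, t) ∈ INTERFACE_ALIASES := by
  rw [PySem.Dict.get?_eq_some_iff_mem_items _ _ _ alias_keys_nodup, alias_items] at h
  exact h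

theorem alias_get?_mem {s t : List Char} (h : (s, t) ∈ INTERFACE_ALIASES) :
    ALIAS_MAP.get? s = some t := by
  apply PySem.Dict.get?_of_mem_items _ _ alias_keys_nodup
  rw [alias_items]; exact h

theorem pyReplace1_of_prefix (old new s : List Char) (h : old <+: s) :
    pyReplace1 old new s = new ++ s.drop old.length := by
  unfold pyReplace1
  rw [if_pos (List.isPrefixOf_iff_prefix.mpr h)]

theorem drop_min (xs : List α) (m : Nat) : xs.drop (min m xs.length) = xs.drop m := by
  rcases le_total m xs.length with h | h
  · rw [min_eq_left h]
  · rw [min_eq_right h, List.drop_of_length_le h, List.drop_of_length_le le_rfl]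

theorem loopA_eq_find (al : List (List Char × List Char)) (raw : List Char) :
    aliasLoopA al raw =
      match al.find? (fun p => PySem.Chars.startswith raw p.1) with
      | some (s, t) => pyReplace1 s t raw
      | none => raw := by
  induction al with
  | nil => rfl
  | cons p rest ih =>
    obtain ⟨src, tgt⟩ := p
    by_cases h : PySem.Chars.startswith raw src = true
    · simp [aliasLoopA, List.find?, h]
    · simp only [aliasLoopA, List.find?, h, if_neg, Bool.false_eq_true, not_false_eq_true] at *
      simpa [h] using ih

theorem loopB_none (raw : List Char)
    (h : ∀ p ∈ INTERFACE_ALIASES, ¬ p.1 <+: raw) :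
    ∀ ns : List Int, (∀ n ∈ ns, 0 ≤ n) → aliasLoopB ns raw = raw := by
  intro ns
  induction ns with
  | nil => intro _; rfl
  | cons n ns ih =>
    intro hpos
    have hn : 0 ≤ n := hpos n (List.mem_cons_self ..)
    unfold aliasLoopB
    rw [PySem.List.slice_to raw hn]
    cases hg : ALIAS_MAP.get? (List.take n.toNat raw) with
    | some t =>
      exact absurd (List.take_prefix _ _) (h _ (alias_get?_some hg))
    | none =>
      exact ih (fun m hm => hpos m (List.mem_cons_of_mem _ hm))

theorem loopB_some (raw s t : List Char) (hmem : (s, t) ∈ INTERFACE_ALIASES) (hpre : s <+: raw) :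
    ∀ ns : List Int, (∀ n ∈ ns, 0 ≤ n) → ((s.length : Int)) ∈ ns →
      aliasLoopB ns raw = t ++ raw.drop s.length := by
  intro ns
  induction ns with
  | nil => intro _ h; exact absurd h (List.not_mem_nil)
  | cons n ns ih =>
    intro hpos hlen
    have hn : 0 ≤ n := hpos n (List.mem_cons_self ..)
    unfold aliasLoopB
    rw [PySem.List.slice_to raw hn, PySem.List.slice_from raw hn]
    cases hg : ALIAS_MAP.get? (List.take n.toNat raw) with
    | some t' =>
      have hmem' : (List.take n.toNat raw, t') ∈ INTERFACE_ALIASES := alias_get?_some hg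
      have heq : (List.take n.toNat raw, t') = (s, t) :=
        alias_uniq raw _ hmem' _ hmem (List.take_prefix _ _) hpre
      have hs : List.take n.toNat raw = s := (Prod.mk.injEq .. ▸ heq).1
      have ht : t' = t := (Prod.mk.injEq .. ▸ heq).2
      rw [ht]
      have : s.length = min n.toNat raw.length := by rw [← hs, List.length_take]
      rw [this, drop_min]
    | none =>
      rcases List.mem_cons.mp hlen with h | h
      · exfalso
        have hnt : n.toNat = s.length := by omega
        have : List.take n.toNat raw = s := by
          rw [hnt, ← List.prefix_iff_eq_take.mp hpre]
        rw [this, alias_get?_mem hmem] at hg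
        simp at hg
      · exact ih (fun m hm => hpos m (List.mem_cons_of_mem _ hm)) h

theorem loops_eq (raw : List Char) :
    aliasLoopA INTERFACE_ALIASES raw = aliasLoopB ALIAS_LENGTHS raw := by
  rw [loopA_eq_find]
  cases hf : INTERFACE_ALIASES.find? (fun p => PySem.Chars.startswith raw p.1) with
  | none =>
    have h : ∀ p ∈ INTERFACE_ALIASES, ¬ p.1 <+: raw := by
      intro p hp hpre
      have := List.find?_eq_none.mp hf p hp
      exact this ((PySem.Chars.startswith_iff raw p.1).mpr hpre)
    exact (loopB_none raw h ALIAS_LENGTHS alias_lengths_nonneg).symm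
  | some p =>
    obtain ⟨s, t⟩ := p
    have hmem : (s, t) ∈ INTERFACE_ALIASES := List.mem_of_find?_eq_some hf
    have hpre : s <+: raw :=
      (PySem.Chars.startswith_iff raw s).mp (by simpa using List.find?_some hf)
    show pyReplace1 s t raw = _
    rw [pyReplace1_of_prefix s t raw hpre,
      loopB_some raw s t hmem hpre ALIAS_LENGTHS alias_lengths_nonneg
        (alias_lengths_mem _ hmem)]

-- ===== VERDICT (by name: the statement is the Claim_ definition above) =====
theorem normalize_interface_name_spec : Claim_equal_normalize_interface_name := by
  intro value _
  unfold Spec_normalize_interface_name normalize_interface_name normalize_interface_name_alt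
  cases value with
  | none => rfl
  | some s =>
    by_cases h : s.toList = []
    · simp [h]
    · simp only [h, if_false, loops_eq]
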